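-- pv_equiv track=rewrite | github.com/light-le/AdventOfCode | 2015/day17.py | possible_container_combinations
-- ===== SOURCE A (Python) =====
-- from itertools import combinations, accumulate
--
-- def determine_max_min(acc):
--     for a, ac in enumerate(acc):
--         if ac > 150:
--             return a+1
--
-- def possible_container_combinations(scs):
--     maximum_containers = determine_max_min(accumulate(scs))
--     minimum_containers = determine_max_min(accumulate(scs[::-1]))
--
--     combs = [combinations(scs, r) for r in range(minimum_containers, maximum_containers+1)]
--
--     possible_combinations = []
--     for comb in combs:
--         rcomb = [rc for rc in comb if sum(rc) == 150]
--         possible_combinations.extend(rcomb)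
--
--     return possible_combinations
-- ===== SOURCE B (Python) =====
-- def possible_container_combinations(scs):
--     # Single depth-capped DFS over the subset tree instead of one itertools
--     # combinations pass per size; hits are grouped by size afterwards.
--     def first_exceed(xs):
--         total = 0
--         for i, x in enumerate(xs):
--             total += x
--             if total > 150:
--                 return i + 1
--
--     hi = first_exceed(scs)
--     lo = first_exceed(scs[::-1])
--     n = len(scs)
--     found = []
--
--     def dfs(i, chosen, s):
--         if lo <= len(chosen) and s == 150:
--             found.append(chosen)
--         if len(chosen) == hi:
--             return
--         for j in range(i, n):
--             dfs(j + 1, chosen + (scs[j],), s + scs[j])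
--
--     dfs(0, (), 0)
--     return [c for r in range(lo, hi + 1) for c in found if len(c) == r]
-- ===== Notes on version B (the rewrite author's own statement) =====
-- stated objective: alternative
-- what changed: A runs itertools.combinations once per size r in [min,max] and filters each pass for sum 150; B runs a single depth-capped DFS over the subset tree collecting all hits in one traversal, then groups them by size.
import Mathlib
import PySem

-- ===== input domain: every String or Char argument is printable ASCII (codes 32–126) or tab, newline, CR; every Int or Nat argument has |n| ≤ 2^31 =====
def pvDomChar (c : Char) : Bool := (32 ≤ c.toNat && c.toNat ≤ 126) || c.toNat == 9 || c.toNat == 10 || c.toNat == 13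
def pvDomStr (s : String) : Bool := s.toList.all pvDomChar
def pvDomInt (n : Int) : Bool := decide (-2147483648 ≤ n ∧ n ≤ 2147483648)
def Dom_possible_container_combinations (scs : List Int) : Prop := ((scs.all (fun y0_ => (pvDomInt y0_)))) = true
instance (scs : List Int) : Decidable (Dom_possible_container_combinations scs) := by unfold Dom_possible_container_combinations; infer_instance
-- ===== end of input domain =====

-- B replaces A's per-size itertools.combinations passes by one depth-capped DFS over the
-- subset tree followed by a grouping-by-size pass (objective: alternative algorithm).

-- ===== PORT A =====
-- itertools.accumulate(scs): running prefix sums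
def pvAccumulate (t : Int) : List Int → List Int
  | [] => []
  | x :: xs => (t + x) :: pvAccumulate (t + x) xs

-- determine_max_min: index of first prefix sum > 150, plus one (None → none)
def pvDetMaxMin (i : Nat) : List Int → Option Nat
  | [] => none
  | a :: rest => if a > 150 then some (i + 1) else pvDetMaxMin (i + 1) rest

-- itertools.combinations(xs, r) in its index-lexicographic order
def pvComb : List Int → Nat → List (List Int)
  | _, 0 => [[]]
  | [], _ + 1 => []
  | x :: xs, r + 1 => (pvComb xs r).map (fun c => x :: c) ++ pvComb xs (r + 1)

-- On inputs where Python's determine_max_min returns None, A raises (TypeError);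
-- those inputs are outside Pre_ and the port returns [] there.
def possible_container_combinations (scs : List Int) : List (List Int) :=
  match pvDetMaxMin 0 (pvAccumulate 0 scs), pvDetMaxMin 0 (pvAccumulate 0 scs.reverse) with
  | some maxC, some minC =>
    (List.range' minC (maxC + 1 - minC)).foldl
      (fun acc r => acc ++ (pvComb scs r).filter (fun rc => rc.sum == 150)) []
  | _, _ => []

-- ===== PORT B =====
-- first_exceed: fold with a running total instead of materialising the prefix-sum list
def pvFirstExceed (t : Int) (i : Nat) : List Int → Option Nat
  | [] => none
  | x :: xs => if t + x > 150 then some (i + 1) else pvFirstExceed (t + x) (i + 1) xs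

mutual
-- dfs(i, chosen, s): emit a hit, stop at depth hi, else scan the remaining suffix
def pvDfs (hi lo : Nat) (rest chosen : List Int) (s : Int) : List (List Int) :=
  (if lo ≤ chosen.length ∧ s = 150 then [chosen] else []) ++
  (if chosen.length = hi then [] else pvScan hi lo rest chosen s)
termination_by (rest.length, 1)
-- the 'for j in range(i, n)' loop of dfs, over the suffix scs[i:]
def pvScan (hi lo : Nat) (rest chosen : List Int) (s : Int) : List (List Int) :=
  match rest with
  | [] => []
  | x :: xs => pvDfs hi lo xs (chosen ++ [x]) (s + x) ++ pvScan hi lo xs chosen s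
termination_by (rest.length, 0)
end

-- B raises exactly where A does (first_exceed returned None); the port returns [] there.
def possible_container_combinations_alt (scs : List Int) : List (List Int) :=
  match pvFirstExceed 0 0 scs with
  | none => []
  | some hi =>
    match pvFirstExceed 0 0 scs.reverse with
    | none => []
    | some lo =>
      let found := pvDfs hi lo scs [] 0
      (List.range' lo (hi + 1 - lo)).flatMap (fun r => found.filter (fun c => c.length == r))

-- ===== PRECONDITION & SPEC =====
-- Pre_ excludes exactly the inputs on which no prefix sum (forwards, resp. backwards)
-- exceeds 150: there Python's determine_max_min returns None and A raises TypeError.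
def Pre_possible_container_combinations (scs : List Int) : Prop :=
  (∃ i ∈ List.range scs.length, 150 < (scs.take (i + 1)).sum) ∧
  (∃ i ∈ List.range scs.length, 150 < (scs.reverse.take (i + 1)).sum)
instance (scs : List Int) : Decidable (Pre_possible_container_combinations scs) := by
  unfold Pre_possible_container_combinations; infer_instance
def pvWitness_possible_container_combinations : List Int := [100, 100]

def Spec_possible_container_combinations (scs : List Int) (out : List (List Int)) : Prop := out = possible_container_combinations_alt scs
instance (scs : List Int) (out : List (List Int)) : Decidable (Spec_possible_container_combinations scs out) := by unfold Spec_possible_container_combinations; infer_instance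

-- ===== CLAIM (what is proved, stated in full; the proofs are below) =====
def Claim_equal_possible_container_combinations : Prop := ∀ (scs : List Int), Dom_possible_container_combinations scs → Pre_possible_container_combinations scs → Spec_possible_container_combinations scs (possible_container_combinations scs)

-- ===== LEMMAS AND PROOFS =====

-- A's detMaxMin-over-accumulate equals B's fused first_exceed
theorem detMaxMin_eq_firstExceed (xs : List Int) (t : Int) (i : Nat) :
    pvDetMaxMin i (pvAccumulate t xs) = pvFirstExceed t i xs := by
  induction xs generalizing t i with
  | nil => rfl
  | cons x xs ih => simp [pvAccumulate, pvDetMaxMin, pvFirstExceed, ih]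

mutual
theorem mem_pvDfs_length (hi lo : Nat) (rest chosen : List Int) (s : Int) (c : List Int)
    (hc : c ∈ pvDfs hi lo rest chosen s) : chosen.length ≤ c.length := by
  rw [pvDfs] at hc
  rcases List.mem_append.1 hc with h | h
  · split at h
    · simp at h; simp [h]
    · simp at h
  · split at h
    · simp at h
    · exact Nat.le_of_lt (mem_pvScan_length hi lo rest chosen s c h)
termination_by (rest.length, 1)
theorem mem_pvScan_length (hi lo : Nat) (rest chosen : List Int) (s : Int) (c : List Int)
    (hc : c ∈ pvScan hi lo rest chosen s) : chosen.length < c.length := by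
  match rest with
  | [] => rw [pvScan] at hc; simp at hc
  | x :: xs =>
    rw [pvScan] at hc
    rcases List.mem_append.1 hc with h | h
    · have := mem_pvDfs_length hi lo xs (chosen ++ [x]) (s + x) c h
      simp at this; omega
    · exact mem_pvScan_length hi lo xs chosen s c h
termination_by (rest.length, 0)
end

mutual
theorem pvDfs_filter (hi lo : Nat) (rest chosen : List Int) (k : Nat)
    (hch : chosen.length ≤ hi) :
    (pvDfs hi lo rest chosen chosen.sum).filter (fun c => c.length == chosen.length + k)
      = if lo ≤ chosen.length + k ∧ chosen.length + k ≤ hi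
        then ((pvComb rest k).map (fun c => chosen ++ c)).filter (fun rc => rc.sum == 150)
        else [] := by
  rw [pvDfs, List.filter_append]
  match k with
  | 0 =>
    have h2 : ((if chosen.length = hi then [] else pvScan hi lo rest chosen chosen.sum).filter
        (fun c => c.length == chosen.length + 0)) = [] := by
      split
      · rfl
      · rw [List.filter_eq_nil_iff]
        intro c hc
        have := mem_pvScan_length hi lo rest chosen chosen.sum c hc
        simp; omega
    rw [h2, List.append_nil]
    by_cases hlo : lo ≤ chosen.length
    · by_cases hs : chosen.sum = 150 <;> simp [pvComb, hlo, hs, hch]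
    · simp [hlo]
  | k + 1 =>
    have h1 : ((if lo ≤ chosen.length ∧ chosen.sum = 150 then [chosen] else []).filter
        (fun c => c.length == chosen.length + (k + 1))) = [] := by
      split <;> simp
    rw [h1, List.nil_append]
    by_cases hhi : chosen.length = hi
    · have hno : ¬ (lo ≤ chosen.length + (k + 1) ∧ chosen.length + (k + 1) ≤ hi) := by omega
      rw [if_pos hhi, if_neg hno]
      rfl
    · rw [if_neg hhi]
      exact pvScan_filter hi lo rest chosen k (by omega)
termination_by (rest.length, 1)
theorem pvScan_filter (hi lo : Nat) (rest chosen : List Int) (k : Nat)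
    (hch : chosen.length < hi) :
    (pvScan hi lo rest chosen chosen.sum).filter (fun c => c.length == chosen.length + (k + 1))
      = if lo ≤ chosen.length + (k + 1) ∧ chosen.length + (k + 1) ≤ hi
        then ((pvComb rest (k + 1)).map (fun c => chosen ++ c)).filter (fun rc => rc.sum == 150)
        else [] := by
  match rest with
  | [] =>
    rw [pvScan]
    simp [pvComb]
  | x :: xs =>
    rw [pvScan, List.filter_append, show chosen.sum + x = (chosen ++ [x]).sum from by simp]
    rw [pvScan_filter hi lo xs chosen k hch]
    have hlen : chosen.length + (k + 1) = (chosen ++ [x]).length + k := by simp; omega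
    have hp : (fun c : List Int => c.length == chosen.length + (k + 1))
        = (fun c : List Int => c.length == (chosen ++ [x]).length + k) := by
      funext c; rw [hlen]
    rw [hp, pvDfs_filter hi lo xs (chosen ++ [x]) k (by simp; omega)]
    have hcond : (lo ≤ (chosen ++ [x]).length + k ∧ (chosen ++ [x]).length + k ≤ hi)
        ↔ (lo ≤ chosen.length + (k + 1) ∧ chosen.length + (k + 1) ≤ hi) := by
      simp; omega
    have hmap : ∀ c : List Int, chosen ++ (x :: c) = (chosen ++ [x]) ++ c := by
      intro c; simp
    by_cases hc : lo ≤ chosen.length + (k + 1) ∧ chosen.length + (k + 1) ≤ hi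
    · rw [if_pos (hcond.2 hc), if_pos hc, if_pos hc]
      simp [pvComb, Function.comp_def]
    · rw [if_neg (fun h => hc (hcond.1 h)), if_neg hc, if_neg hc, List.append_nil]
termination_by (rest.length, 0)
end

-- ===== VERDICT (by name: the statement is the Claim_ definition above) =====
theorem possible_container_combinations_spec : Claim_equal_possible_container_combinations := by
  intro scs _ _
  unfold Spec_possible_container_combinations
  unfold possible_container_combinations possible_container_combinations_alt
  rw [← detMaxMin_eq_firstExceed, ← detMaxMin_eq_firstExceed]
  cases h1 : pvDetMaxMin 0 (pvAccumulate 0 scs) with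
  | none => cases h2 : pvDetMaxMin 0 (pvAccumulate 0 scs.reverse) <;> rfl
  | some hi =>
    cases h2 : pvDetMaxMin 0 (pvAccumulate 0 scs.reverse) with
    | none => rfl
    | some lo =>
      simp only []
      rw [PySem.List.foldl_append_eq_flatMap, List.nil_append]
      apply List.flatMap_congr
      intro r hr
      have hr' := List.mem_range'.1 hr
      have hdfs := pvDfs_filter hi lo scs [] r (Nat.zero_le hi)
      simp only [List.sum_nil, List.length_nil, Nat.zero_add, List.nil_append] at hdfs
      rw [hdfs, if_pos (by obtain ⟨i, h, e⟩ := hr'; omega)]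
      simp
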